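/- GENERATED by mk_final_copies.py from the proof of the farm's unit `get_window` (farm:get_window.1: Proof.lean) as the
   re-elaboration sweep compiled it — do not edit. -/
import Asan.CheckWalk
import Vorbis.Spec.Units.get_window

open X86 X86.User Asan Vorbis

set_option maxRecDepth 4000
set_option maxHeartbeats 4000000

namespace Vorbis.Spec.get_window

/-- `lea ebp, [rsi + rsi]` (C line 3088, `len *= 2`): the low 32 bits of `rsi + rsi`, as the number of the contract's post. -/
theorem lea_double (x : Word) :
    (BitVec.setWidth 32 (x + x).toBitVec).toNat = (2 * x.toNat) % 2 ^ 32 := by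
  rw [BitVec.toNat_setWidth, UInt64.toBitVec_add, BitVec.toNat_add, UInt64.toNat_toBitVec]
  omega

/-- A pointer field read back from the register it was loaded into (`mov rax, [rbx + 5A8H]`): the 8-byte read is below `2 ^ 64`. -/
theorem toNat_ofNat_ptr (mem : Mem) (a : Nat) : (UInt64.ofNat (mem.ptr a)).toNat = mem.ptr a := by
  rw [UInt64.toNat_ofNat']
  exact Nat.mod_eq_of_lt (Mem.ptr_lt mem a)

end Vorbis.Spec.get_window

/-- `get_window(f, len)` satisfies its contract (CONTRACTS 17): two pushes and `sub rsp, 8`, `lea ebp, [rsi + rsi]`, two checked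
4-byte comparisons with `f->blocksize_0` / `f->blocksize_1`, a checked 8-byte load of `f->window[0]` / `f->window[1]` or `0`; three
paths joining at 0x106f99 (`add rsp, 8 ; pop rbx ; pop rbp ; ret`). One walk; the four check sites lie inside the live `*f` (OB1). -/
theorem Vorbis.Spec.Worked.get_window_ok : Vorbis.Spec.get_window.Statement := by
  intro Lay hLay μ hμ u₀ hcode hload4 hload8 others frames u ret he hpre
  v_entry he
  obtain ⟨hsh, hlive⟩ := hpre
  -- where `*f` is: one arithmetic fact (inside the data space, off the text, off this function's stack)
  have hsp := hsh.rsp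
  have hwhere := hlive.where_ hsh.inv hsh.offText (by decide) (by u_omega)
  simp only [Vorbis.Off.sizeof.stb_vorbis] at hwhere
  -- the object's address as a number, and the four field loads as facts (rewrite rules of every step)
  obtain ⟨f, hf⟩ : ∃ f : Nat, (u.reg .rdi).toNat = f := ⟨_, rfl⟩
  have hr : u.reg .rdi = addr f := eq_addr _ _ hf
  have r152 : u.mem.readLE (addr f + 152) 4 = u.mem.u32 (f + 152) := by simp only [vfield]
  have r156 : u.mem.readLE (addr f + 156) 4 = u.mem.u32 (f + 156) := by simp only [vfield]
  have r1448 : u.mem.readLE (addr f + 1448) 8 = stb_vorbis.window u.mem f 0 := by simp only [vfield, vacc, voff]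
  have r1456 : u.mem.readLE (addr f + 1456) 8 = stb_vorbis.window u.mem f 1 := by simp only [vfield, vacc, voff]
  u_walk hcode [hμ.vendor] span [Vorbis.L.textLo, Vorbis.L.textHi] side (v_side)
  case check_106f73 =>
    -- 0x106f73, C line 3089: load4 of `f->blocksize_0` (f + 98H), inside `*f`; the stack stores did not touch the shadow
    have hun : ShadowUntouched u.mem s_106f73.mem := by v_untouched
    refine hlive.accSmall hsh.inv hun _ 4 (by decide) (by u_omega) ?_
    simp only [Vorbis.Off.sizeof.stb_vorbis]
    u_omega
  case check_106fa7 =>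
    -- 0x106fa7, C line 3089: load8 of `f->window[0]` (f + 5A8H), inside `*f`
    have hun : ShadowUntouched u.mem s_106fa7.mem := by v_untouched
    refine hlive.accSmall hsh.inv hun _ 8 (by decide) (by u_omega) ?_
    simp only [Vorbis.Off.sizeof.stb_vorbis]
    u_omega
  case check_106f87 =>
    -- 0x106f87, C line 3090: load4 of `f->blocksize_1` (f + 9CH), inside `*f`
    have hun : ShadowUntouched u.mem s_106f87.mem := by v_untouched
    refine hlive.accSmall hsh.inv hun _ 4 (by decide) (by u_omega) ?_
    simp only [Vorbis.Off.sizeof.stb_vorbis]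
    u_omega
  case check_106fbc =>
    -- 0x106fbc, C line 3090: load8 of `f->window[1]` (f + 5B0H), inside `*f`
    have hun : ShadowUntouched u.mem s_106fbc.mem := by v_untouched
    refine hlive.accSmall hsh.inv hun _ 8 (by decide) (by u_omega) ?_
    simp only [Vorbis.Off.sizeof.stb_vorbis]
    u_omega
  · -- 0x106f9f, the `ret` after `return f->window[0]` (C line 3089): the first comparison was equal
    refine ReachVia.done ?_
    v_returned
    have ht := Vorbis.Spec.get_window.lea_double (u.reg .rsi)
    have h32 := u.mem.u32_lt (f + 152)
    subst hf
    refine ⟨by v_untouched, ?_, ?_, ?_⟩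
    · intro _
      rw [w_rax]
      exact Vorbis.Spec.get_window.toNat_ofNat_ptr _ _
    · intro hne
      exfalso
      omega
    · intro hne
      exfalso
      omega
  · -- 0x106f9f, the `ret` after `return f->window[1]` (C line 3090): the second comparison was equal
    refine ReachVia.done ?_
    v_returned
    have ht := Vorbis.Spec.get_window.lea_double (u.reg .rsi)
    have h32 := u.mem.u32_lt (f + 152)
    have h32' := u.mem.u32_lt (f + 156)
    subst hf
    refine ⟨by v_untouched, ?_, ?_, ?_⟩
    · intro heq
      exfalso
      omega
    · intro _ _
      rw [w_rax]
      exact Vorbis.Spec.get_window.toNat_ofNat_ptr _ _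
    · intro _ hne
      exfalso
      omega
  · -- 0x106f9f, the `ret` after `return NULL` (C line 3091): neither comparison was equal
    refine ReachVia.done ?_
    v_returned
    have ht := Vorbis.Spec.get_window.lea_double (u.reg .rsi)
    have h32 := u.mem.u32_lt (f + 152)
    have h32' := u.mem.u32_lt (f + 156)
    subst hf
    refine ⟨by v_untouched, ?_, ?_, ?_⟩
    · intro heq
      exfalso
      omega
    · intro _ heq
      exfalso
      omega
    · intro _ _
      rw [w_rax]
      rfl
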